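-- pv_equiv track=rewrite | github.com/ruanjiayi/Information_Retrieval_Tool | src/indexing.py | terms2term_pos
-- ===== SOURCE A (Python) =====
-- def terms2term_pos(terms, stopwords):
--     '''
--     :param terms:
--     :type terms:list(str)
--     :param stopwords: the set of stopwords to be used
--     :type stopwords:set(str)
--     :return: terms_pos
--     :rtype: dict(str:list(int))
--     '''
--     term_pos = {}
--     for index, term in enumerate(terms):
--         if term in stopwords:
--             continue
--         if term not in term_pos.keys():
--             term_pos[term] = []
--         term_pos[term].append(index)
--     for term in term_pos.keys():
--         term_pos[term].sort()
--     return term_pos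
-- ===== SOURCE B (Python) =====
-- def terms2term_pos(terms, stopwords):
--     term_pos = {}
--     for t in terms:
--         if t in stopwords or t in term_pos:
--             continue
--         term_pos[t] = [i for i, u in enumerate(terms) if u == t]
--     return term_pos
-- ===== Notes on version B (the rewrite author's own statement) =====
-- stated objective: alternative
-- what changed: B abandons A's single-pass incremental dict of appended lists plus a final per-key sort pass: it loops over terms and, for each non-stopword term not yet a key, computes its whole position list at once by a fresh comprehension scan over enumerate(terms); no appending, no sorting, trading one pass for a scan per distinct term.
import Mathlib
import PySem

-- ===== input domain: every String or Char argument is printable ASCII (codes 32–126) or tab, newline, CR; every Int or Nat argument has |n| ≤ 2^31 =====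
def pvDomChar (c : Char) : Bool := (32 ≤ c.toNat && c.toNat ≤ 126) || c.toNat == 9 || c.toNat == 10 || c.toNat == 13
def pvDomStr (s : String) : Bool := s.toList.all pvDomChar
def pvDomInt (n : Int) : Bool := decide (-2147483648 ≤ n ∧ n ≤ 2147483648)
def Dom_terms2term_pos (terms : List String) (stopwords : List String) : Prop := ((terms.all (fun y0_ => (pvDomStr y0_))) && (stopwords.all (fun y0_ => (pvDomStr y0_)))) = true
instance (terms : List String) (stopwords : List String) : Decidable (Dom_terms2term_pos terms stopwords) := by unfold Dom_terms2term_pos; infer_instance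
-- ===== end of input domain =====

-- B drops A's incremental dict-of-lists and the final sort pass: for each new non-stopword
-- term it rescans enumerate(terms) for that term's positions; an alternative, not faster.

-- ===== PORT A =====
-- loop body of A's first for-loop (after the stopword 'continue'): ensure key, append index
def pvStep (d : PySem.Dict String (List Int)) (p : Int × String) : PySem.Dict String (List Int) :=
  let d := if (PySem.Dict.get? d p.2).isNone then PySem.Dict.insert d p.2 [] else d
  PySem.Dict.modify d p.2 [] (fun l => l ++ [p.1])

-- loop body of A's second for-loop: term_pos[term].sort()
def pvSortStep (d : PySem.Dict String (List Int)) (t : String) : PySem.Dict String (List Int) :=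
  PySem.Dict.modify d t [] (fun l => PySem.List.sorted l id)

def terms2term_pos (terms : List String) (stopwords : List String) : List (String × List Int) :=
  let d := (PySem.List.enumerate terms).foldl
      (fun d p => if stopwords.contains p.2 then d else pvStep d p) (PySem.Dict.mk [])
  (d.keys.foldl pvSortStep d).items

-- ===== PORT B =====
-- the comprehension [i for i, u in enumerate(terms) if u == t]
def pvScan (terms : List String) (t : String) : List Int :=
  (PySem.List.enumerate terms).filterMap (fun p => if p.2 == t then some p.1 else none)

def terms2term_pos_alt (terms : List String) (stopwords : List String) : List (String × List Int) :=
  (terms.foldl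
    (fun d t =>
      if stopwords.contains t || PySem.Dict.contains d t then d
      else PySem.Dict.insert d t (pvScan terms t))
    (PySem.Dict.mk [])).items

-- ===== PRECONDITION & SPEC =====
def Spec_terms2term_pos (terms : List String) (stopwords : List String) (out : List (String × List Int)) : Prop := out = terms2term_pos_alt terms stopwords
instance (terms : List String) (stopwords : List String) (out : List (String × List Int)) : Decidable (Spec_terms2term_pos terms stopwords out) := by unfold Spec_terms2term_pos; infer_instance

-- ===== CLAIM (what is proved, stated in full; the proofs are below) =====
def Claim_equal_terms2term_pos : Prop := ∀ (terms : List String) (stopwords : List String), Dom_terms2term_pos terms stopwords → Spec_terms2term_pos terms stopwords (terms2term_pos terms stopwords)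

-- ===== LEMMAS AND PROOFS =====

-- positions of term t in an enumerated list
def pvPos (t : String) (ps : List (Int × String)) : List Int :=
  ps.filterMap (fun p => if p.2 == t then some p.1 else none)

-- the grouping A computes on the stopword-filtered enumerated list
def pvGather (ps : List (Int × String)) : List (String × List Int) :=
  (PySem.List.dedup (ps.map Prod.snd)).map (fun t => (t, pvPos t ps))

theorem pv_foldl_skip (c : String → Bool) (ps : List (Int × String))
    (d : PySem.Dict String (List Int)) :
    ps.foldl (fun d p => if c p.2 then d else pvStep d p) d
      = (ps.filter (fun p => !c p.2)).foldl pvStep d := by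
  induction ps generalizing d with
  | nil => rfl
  | cons p rest ih =>
      by_cases h : c p.2 = true <;> simp [h, ih]

theorem pv_pos_append (t : String) (ps : List (Int × String)) (p : Int × String) :
    pvPos t (ps ++ [p]) = pvPos t ps ++ (if p.2 = t then [p.1] else []) := by
  simp [pvPos, List.filterMap_append]
  split_ifs with h <;> simp [h]

theorem pv_pos_nil_of_not_mem (t : String) (ps : List (Int × String))
    (h : t ∉ ps.map Prod.snd) : pvPos t ps = [] := by
  induction ps with
  | nil => rfl
  | cons p rest ih =>
      rw [List.map_cons] at h
      have h1 : ¬ (p.2 = t) := fun he => h (by simp [he])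
      have h2 : t ∉ rest.map Prod.snd := fun hm => h (List.mem_cons_of_mem _ hm)
      simp [pvPos, h1]
      simpa [pvPos] using ih h2

theorem pv_get?_map_of_mem {f : String → List Int} {L : List String} {t : String}
    (h : t ∈ L) :
    PySem.Dict.get? ⟨L.map (fun t' => (t', f t'))⟩ t = some (f t) := by
  induction L with
  | nil => simp at h
  | cons a rest ih =>
      by_cases ha : a = t
      · subst ha; simp [PySem.Dict.get?]
      · have hr : t ∈ rest := by
          rcases List.mem_cons.1 h with h' | h'
          · exact absurd h'.symm ha
          · exact h'
        have hne : ¬ (a = t) := ha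
        simpa [PySem.Dict.get?, List.find?_cons, hne] using ih hr

theorem pv_get?_map_of_not_mem {f : String → List Int} {L : List String} {t : String}
    (h : t ∉ L) :
    PySem.Dict.get? ⟨L.map (fun t' => (t', f t'))⟩ t = none := by
  induction L with
  | nil => rfl
  | cons a rest ih =>
      rw [List.mem_cons, not_or] at h
      have ha : ¬ (a = t) := fun he => h.1 he.symm
      simpa [PySem.Dict.get?, List.find?_cons, ha] using ih h.2

theorem pv_contains_map {f : String → List Int} (L : List String) (t : String) :
    PySem.Dict.contains ⟨L.map (fun t' => (t', f t'))⟩ t = true ↔ t ∈ L := by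
  simp [PySem.Dict.contains, List.any_map, Function.comp]

theorem pv_dedup_snoc {L : List String} (t : String) :
    PySem.List.dedup (L ++ [t])
      = if t ∈ L then PySem.List.dedup L else PySem.List.dedup L ++ [t] := by
  have : PySem.List.dedup (L ++ [t]) = PySem.Set.add (PySem.Set.ofList L) t := by
    simp [PySem.List.dedup, PySem.Set.ofList, List.foldl_append]
  rw [this, PySem.Set.add]
  by_cases hm : t ∈ L
  · rw [if_pos ((PySem.Set.contains_iff _ t).2 ((PySem.Set.mem_ofList L t).2 hm)), if_pos hm]
    rfl
  · rw [if_neg, if_neg hm]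
    · rfl
    · intro hc
      exact hm ((PySem.Set.mem_ofList L t).1 ((PySem.Set.contains_iff _ t).1 hc))

theorem pv_fold_step (ps : List (Int × String)) :
    (ps.foldl pvStep (PySem.Dict.mk [])).items = pvGather ps := by
  induction ps using List.reverseRecOn with
  | nil => rfl
  | append_singleton ps p ih =>
      rw [List.foldl_append, List.foldl_cons, List.foldl_nil]
      have hd : ps.foldl pvStep (PySem.Dict.mk []) = ⟨pvGather ps⟩ := by rw [← ih]
      rw [hd]
      have hsnd : (ps ++ [p]).map Prod.snd = ps.map Prod.snd ++ [p.2] := by simp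
      by_cases hm : p.2 ∈ ps.map Prod.snd
      · have hmD : p.2 ∈ PySem.List.dedup (ps.map Prod.snd) :=
          (PySem.Set.mem_ofList _ _).2 hm
        have hget : PySem.Dict.get? (⟨pvGather ps⟩ : PySem.Dict String (List Int)) p.2
            = some (pvPos p.2 ps) := pv_get?_map_of_mem hmD
        have hcon : PySem.Dict.contains (⟨pvGather ps⟩ : PySem.Dict String (List Int)) p.2
            = true := (pv_contains_map _ _).2 hmD
        show (PySem.Dict.modify
            (if (PySem.Dict.get? (⟨pvGather ps⟩ : PySem.Dict String (List Int)) p.2).isNone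
              then PySem.Dict.insert (⟨pvGather ps⟩ : PySem.Dict String (List Int)) p.2 []
              else ⟨pvGather ps⟩) p.2 [] (fun l => l ++ [p.1])).items = _
        rw [hget]
        simp only [Option.isNone_some, Bool.false_eq_true, if_false]
        rw [PySem.Dict.modify, PySem.Dict.getD, hget, Option.getD_some, PySem.Dict.insert,
          if_pos hcon]
        show ((pvGather ps).map fun (q : String × List Int) =>
              if q.1 == p.2 then (p.2, pvPos p.2 ps ++ [p.1]) else q)
            = pvGather (ps ++ [p])
        rw [pvGather, pvGather, hsnd, pv_dedup_snoc, if_pos hm, List.map_map]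
        refine List.map_congr_left (fun t' ht' => ?_)
        by_cases he : t' = p.2
        · subst he
          simp [pv_pos_append]
        · have hne : ¬ (t' == p.2) = true := by simpa using he
          have hne2 : ¬ (p.2 = t') := fun h => he h.symm
          simp [Function.comp, hne, pv_pos_append, hne2]
      · have hmD : p.2 ∉ PySem.List.dedup (ps.map Prod.snd) :=
          fun hc => hm ((PySem.Set.mem_ofList _ _).1 hc)
        have hget : PySem.Dict.get? (⟨pvGather ps⟩ : PySem.Dict String (List Int)) p.2
            = none := pv_get?_map_of_not_mem hmD
        have hcon : ¬ PySem.Dict.contains (⟨pvGather ps⟩ : PySem.Dict String (List Int)) p.2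
            = true := fun hc => hmD ((pv_contains_map _ _).1 hc)
        show (PySem.Dict.modify
            (if (PySem.Dict.get? (⟨pvGather ps⟩ : PySem.Dict String (List Int)) p.2).isNone
              then PySem.Dict.insert (⟨pvGather ps⟩ : PySem.Dict String (List Int)) p.2 []
              else ⟨pvGather ps⟩) p.2 [] (fun l => l ++ [p.1])).items = _
        rw [hget]
        simp only [Option.isNone_none, if_true]
        rw [PySem.Dict.insert, if_neg hcon]
        have hget' : PySem.Dict.get?
            (⟨pvGather ps ++ [(p.2, [])]⟩ : PySem.Dict String (List Int)) p.2 = some [] := by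
          rw [PySem.Dict.get?]
          show (((pvGather ps) ++ [(p.2, [])]).find?
              (fun (q : String × List Int) => q.1 == p.2)).map Prod.snd = some []
          rw [List.find?_append]
          have h1 : (pvGather ps).find? (fun q => q.1 == p.2) = none := by
            have := pv_get?_map_of_not_mem (f := fun t' => pvPos t' ps) hmD
            rw [PySem.Dict.get?] at this
            rcases hf : (pvGather ps).find? (fun q => q.1 == p.2) with _ | r
            · exact hf
            · rw [pvGather] at hf
              rw [hf] at this
              simp at this
          rw [h1, Option.none_or]
          simp
        have hcon' : PySem.Dict.contains
            (⟨pvGather ps ++ [(p.2, [])]⟩ : PySem.Dict String (List Int)) p.2 = true := by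
          simp [PySem.Dict.contains]
        rw [PySem.Dict.modify, PySem.Dict.getD, hget', Option.getD_some, PySem.Dict.insert,
          if_pos hcon']
        show ((pvGather ps ++ [(p.2, [])]).map
            fun (q : String × List Int) => if q.1 == p.2 then (p.2, [] ++ [p.1]) else q)
            = pvGather (ps ++ [p])
        rw [List.map_append, pvGather, pvGather, hsnd, pv_dedup_snoc, if_neg hm, List.map_append,
          List.map_map]
        congr 1
        · refine List.map_congr_left (fun t' ht' => ?_)
          have hne : ¬ (t' = p.2) := fun he => hmD (he ▸ ht')
          have hneb : ¬ (t' == p.2) = true := by simpa using hne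
          have hne2 : ¬ (p.2 = t') := fun h => hne h.symm
          simp [Function.comp, hneb, pv_pos_append, hne2]
        · simp [pv_pos_append, pv_pos_nil_of_not_mem p.2 ps hm]

theorem pv_pos_sublist_fst (t : String) (ps : List (Int × String)) :
    (pvPos t ps).Sublist (ps.map Prod.fst) := by
  induction ps with
  | nil => simp [pvPos]
  | cons p rest ih =>
      simp [pvPos, List.filterMap_cons]
      split_ifs with h
      · simpa [pvPos] using List.Sublist.cons₂ p.1 ih
      · simpa [pvPos] using List.Sublist.cons p.1 ih

theorem pv_enumerate_fst_lb (terms : List String) (s : Int) :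
    ∀ i ∈ (PySem.List.enumerate terms s).map Prod.fst, s ≤ i := by
  induction terms generalizing s with
  | nil => intro i hi; simp [PySem.List.enumerate] at hi
  | cons x xs ih =>
      intro i hi
      rw [show PySem.List.enumerate (x::xs) s = (s,x) :: PySem.List.enumerate xs (s+1) from rfl,
        List.map_cons] at hi
      rcases List.mem_cons.1 hi with rfl | hi'
      · exact le_refl _
      · have := ih (s+1) i hi'; omega

theorem pv_enumerate_fst_pairwise (terms : List String) (s : Int) :
    ((PySem.List.enumerate terms s).map Prod.fst).Pairwise (· < ·) := by
  induction terms generalizing s with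
  | nil => simp [PySem.List.enumerate]
  | cons x xs ih =>
      rw [show PySem.List.enumerate (x::xs) s = (s,x) :: PySem.List.enumerate xs (s+1) from rfl,
        List.map_cons]
      refine List.pairwise_cons.2 ⟨fun i hi => ?_, ih (s+1)⟩
      have := pv_enumerate_fst_lb xs (s+1) i hi; omega

theorem pv_enumerate_snd (terms : List String) (s : Int) :
    (PySem.List.enumerate terms s).map Prod.snd = terms := by
  induction terms generalizing s with
  | nil => rfl
  | cons x xs ih =>
      rw [show PySem.List.enumerate (x::xs) s = (s,x) :: PySem.List.enumerate xs (s+1) from rfl,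
        List.map_cons, ih (s+1)]

theorem pv_key_unique {l : List (String × List Int)} (hnd : (l.map Prod.fst).Nodup)
    {p q : String × List Int} (hp : p ∈ l) (hq : q ∈ l) (h : p.1 = q.1) : p = q := by
  induction l with
  | nil => simp at hp
  | cons a rest ih =>
      rw [List.map_cons, List.nodup_cons] at hnd
      rcases List.mem_cons.1 hp with rfl | hp' <;> rcases List.mem_cons.1 hq with rfl | hq'
      · rfl
      · exact absurd (List.mem_map.2 ⟨q, hq', h.symm⟩) hnd.1
      · exact absurd (List.mem_map.2 ⟨p, hp', h⟩) hnd.1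
      · exact ih hnd.2 hp' hq'

theorem pv_sortStep_id (d : PySem.Dict String (List Int))
    (hs : ∀ q ∈ d.items, PySem.List.sorted q.2 id = q.2)
    (hnd : (d.items.map Prod.fst).Nodup)
    {t : String} (ht : t ∈ d.keys) : pvSortStep d t = d := by
  obtain ⟨p, hp, hpt⟩ := List.mem_map.1 ht
  rcases hf : d.items.find? (fun q => q.1 == t) with _ | r
  · exact absurd (List.find?_eq_none.1 hf p hp (by simp [hpt])) (by simp)
  · have hr : r ∈ d.items := List.mem_of_find?_eq_some hf
    have hrt : r.1 = t := by simpa using List.find?_some hf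
    have hget : PySem.Dict.get? d t = some r.2 := by rw [PySem.Dict.get?, hf]; rfl
    have hcon : PySem.Dict.contains d t = true := by
      rw [PySem.Dict.contains]; exact List.any_eq_true.2 ⟨r, hr, by simp [hrt]⟩
    rw [pvSortStep, PySem.Dict.modify, PySem.Dict.getD, hget, Option.getD_some, hs r hr,
      PySem.Dict.insert, if_pos hcon]
    have : (d.items.map fun q => if q.1 == t then (t, r.2) else q) = d.items := by
      refine (List.map_congr_left fun q hq => ?_).trans (List.map_id _)
      by_cases hqt : (q.1 == t) = true
      · have : q = r := pv_key_unique hnd hq hr (by simpa [hrt] using hqt)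
        subst this
        simp [← hrt]
      · simp [hqt]
    rw [this]

theorem pv_sort_pass (ts : List String) (d : PySem.Dict String (List Int))
    (hs : ∀ q ∈ d.items, PySem.List.sorted q.2 id = q.2)
    (hnd : (d.items.map Prod.fst).Nodup)
    (hts : ∀ t ∈ ts, t ∈ d.keys) :
    ts.foldl pvSortStep d = d := by
  induction ts with
  | nil => rfl
  | cons t ts ih =>
      rw [List.foldl_cons, pv_sortStep_id d hs hnd (hts t (List.mem_cons_self))]
      exact ih (fun t' h' => hts t' (List.mem_cons_of_mem _ h'))

theorem pv_pos_filter (t : String) (c : String → Bool) (ps : List (Int × String))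
    (ht : c t = false) :
    pvPos t (ps.filter (fun p => !c p.2)) = pvPos t ps := by
  induction ps with
  | nil => rfl
  | cons p rest ih =>
      by_cases h : c p.2 = true
      · have hne : ¬ (p.2 = t) := fun he => by rw [he] at h; simp [ht] at h
        simp [pvPos, h, hne]
        simpa [pvPos] using ih
      · simp only [Bool.not_eq_true] at h
        simp [pvPos, h]
        by_cases h2 : p.2 = t <;> simp [h2] <;> simpa [pvPos] using ih

theorem pv_values_sorted (fps : List (Int × String))
    (hpw : (fps.map Prod.fst).Pairwise (· < ·)) :
    ∀ q ∈ pvGather fps, PySem.List.sorted q.2 id = q.2 := by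
  intro q hq
  obtain ⟨t', _, rfl⟩ := List.mem_map.1 hq
  have hsub : (pvPos t' fps).Sublist (fps.map Prod.fst) := pv_pos_sublist_fst t' fps
  have hpw2 : (pvPos t' fps).Pairwise (· < ·) := hpw.sublist hsub
  exact PySem.List.sorted_eq_of_perm_of_pairwise_lt _ _ id (List.Perm.refl _)
    (by simpa using hpw2)

theorem pv_gather_keys (fps : List (Int × String)) :
    (pvGather fps).map Prod.fst = PySem.List.dedup (fps.map Prod.snd) := by
  rw [pvGather, List.map_map]
  exact List.map_id _

-- B's fold builds precisely the dedup-of-filtered keys, each paired with f applied to it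
theorem pv_alt_fold (c : String → Bool) (f : String → List Int) (xs : List String) :
    (xs.foldl
      (fun d t => if c t || PySem.Dict.contains d t then d
        else PySem.Dict.insert d t (f t)) (PySem.Dict.mk [])).items
    = (PySem.List.dedup (xs.filter (fun t => !c t))).map (fun t => (t, f t)) := by
  induction xs using List.reverseRecOn with
  | nil => rfl
  | append_singleton xs t ih =>
      rw [List.foldl_append, List.foldl_cons, List.foldl_nil]
      have hd : xs.foldl
          (fun d t => if c t || PySem.Dict.contains d t then d
            else PySem.Dict.insert d t (f t)) (PySem.Dict.mk [])
          = ⟨(PySem.List.dedup (xs.filter (fun t => !c t))).map (fun t => (t, f t))⟩ := by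
        rw [← ih]
      rw [hd]
      by_cases hc : c t = true
      · have hfil : (xs ++ [t]).filter (fun t => !c t) = xs.filter (fun t => !c t) := by
          simp [List.filter_append, hc]
        rw [hfil]
        simp [hc]
      · simp only [Bool.not_eq_true] at hc
        have hfil : (xs ++ [t]).filter (fun t' => !c t')
            = xs.filter (fun t' => !c t') ++ [t] := by
          simp [List.filter_append, hc]
        rw [hfil, pv_dedup_snoc]
        by_cases hmem : t ∈ xs.filter (fun t' => !c t')
        · have hm : t ∈ PySem.List.dedup (xs.filter (fun t' => !c t')) :=
            (PySem.Set.mem_ofList _ _).2 hmem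
          have hcon : PySem.Dict.contains
              (⟨(PySem.List.dedup (xs.filter (fun t' => !c t'))).map (fun t' => (t', f t'))⟩ :
                PySem.Dict String (List Int)) t = true := (pv_contains_map _ _).2 hm
          rw [if_pos hmem]
          simp [hc]
          rw [if_pos (List.mem_of_mem_filter hmem)]
        · have hm : t ∉ PySem.List.dedup (xs.filter (fun t' => !c t')) :=
            fun h => hmem ((PySem.Set.mem_ofList _ _).1 h)
          have hcon : PySem.Dict.contains
              (⟨(PySem.List.dedup (xs.filter (fun t' => !c t'))).map (fun t' => (t', f t'))⟩ :
                PySem.Dict String (List Int)) t = false := by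
            rcases hb : PySem.Dict.contains
              (⟨(PySem.List.dedup (xs.filter (fun t' => !c t'))).map (fun t' => (t', f t'))⟩ :
                PySem.Dict String (List Int)) t with _ | _
            · rfl
            · exact absurd ((pv_contains_map _ _).1 hb) hm
          rw [if_neg hmem]
          rw [if_neg (by rw [hc, hcon]; simp)]
          rw [PySem.Dict.insert, if_neg (by rw [hcon]; simp)]
          simp

theorem terms2term_pos_spec_aux (terms : List String) (stopwords : List String) :
    terms2term_pos terms stopwords = terms2term_pos_alt terms stopwords := by
  rw [terms2term_pos]
  rw [show terms2term_pos_alt terms stopwords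
      = (PySem.List.dedup (terms.filter (fun t => !stopwords.contains t))).map
          (fun t => (t, pvPos t (PySem.List.enumerate terms))) from
    pv_alt_fold (fun t => stopwords.contains t) (fun t => pvScan terms t) terms]
  set fps := (PySem.List.enumerate terms).filter (fun p => !stopwords.contains p.2) with hfps
  have hitems :
      ((PySem.List.enumerate terms).foldl
        (fun d p => if stopwords.contains p.2 then d else pvStep d p)
        (PySem.Dict.mk [])).items = pvGather fps := by
    rw [pv_foldl_skip, pv_fold_step]
  have hdict :
      (PySem.List.enumerate terms).foldl
        (fun d p => if stopwords.contains p.2 then d else pvStep d p)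
        (PySem.Dict.mk []) = ⟨pvGather fps⟩ := by rw [← hitems]
  rw [hdict]
  have hpw : (fps.map Prod.fst).Pairwise (· < ·) := by
    have hsub : (fps.map Prod.fst).Sublist ((PySem.List.enumerate terms).map Prod.fst) :=
      List.filter_sublist.map Prod.fst
    exact (pv_enumerate_fst_pairwise terms 0).sublist hsub
  have hnd : ((pvGather fps).map Prod.fst).Nodup := by
    rw [pv_gather_keys]; exact PySem.Set.nodup_ofList _
  have hsort : (PySem.Dict.keys (⟨pvGather fps⟩ : PySem.Dict String (List Int))).foldl
      pvSortStep (⟨pvGather fps⟩ : PySem.Dict String (List Int))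
        = (⟨pvGather fps⟩ : PySem.Dict String (List Int)) :=
    pv_sort_pass _ _ (pv_values_sorted fps hpw) hnd (fun _ h => h)
  rw [hsort]
  show pvGather fps
      = (PySem.List.dedup (terms.filter (fun t => !stopwords.contains t))).map
          (fun t => (t, pvPos t (PySem.List.enumerate terms)))
  have hkeys : terms.filter (fun t => !stopwords.contains t) = fps.map Prod.snd := by
    rw [hfps]
    conv_lhs => rw [← pv_enumerate_snd terms 0]
    rw [List.filter_map]
    rfl
  rw [hkeys, pvGather]
  refine List.map_congr_left (fun t' ht' => ?_)
  have htf : stopwords.contains t' = false := by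
    have : t' ∈ fps.map Prod.snd := (PySem.Set.mem_ofList _ _).1 ht'
    obtain ⟨p, hp, rfl⟩ := List.mem_map.1 this
    have := List.of_mem_filter hp
    simpa using this
  have hpf : pvPos t' fps = pvPos t' (PySem.List.enumerate terms) :=
    pv_pos_filter t' (fun u => stopwords.contains u) (PySem.List.enumerate terms) htf
  rw [hpf]

-- ===== VERDICT (by name: the statement is the Claim_ definition above) =====
theorem terms2term_pos_spec : Claim_equal_terms2term_pos := by
  intro terms stopwords _
  show terms2term_pos terms stopwords = terms2term_pos_alt terms stopwords
  exact terms2term_pos_spec_aux terms stopwords
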